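-- pv_equiv track=rewrite | github.com/luizaugustoliveira/Algoritmos | Matrizes/rotaciona_diagonal_secundaria/rotaciona.py | rotaciona_ds
-- ===== SOURCE A (Python) =====
-- def pega_diagional(matriz):
--   diagonal = []
--   count = 0
--   for i in range(len(matriz) - 1, -1, -1):
--     diagonal.append(matriz[i][count])
--     count += 1
--
--   return diagonal
--
-- def rotaciona_ds(matriz, direcao):
--   diagonal_secundaria = pega_diagional(matriz)
--
--   if direcao == "cima":
--     ultimo_el = diagonal_secundaria.pop()
--     diagonal_secundaria = [ultimo_el] + diagonal_secundaria
--   else: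
--     primeiro_el = diagonal_secundaria.pop(0)
--     diagonal_secundaria.append(primeiro_el)
--
--   count = len(diagonal_secundaria) - 1
--   for i in range(len(diagonal_secundaria)):
--     matriz[i][count] = diagonal_secundaria[count]
--     count -= 1
--
--   return matriz
-- ===== SOURCE B (Python) =====
-- def rotaciona_ds(matriz, direcao):
--     n = len(matriz)
--     step = 1 if direcao == "cima" else -1
--     return [
--         [matriz[n - 1 - ((n - 1 - i - step) % n)][(n - 1 - i - step) % n]
--          if j == n - 1 - i else x
--          for j, x in enumerate(row)]
--         for i, row in enumerate(matriz)
--     ]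
-- ===== Notes on version B (the rewrite author's own statement) =====
-- stated objective: simpler
-- what changed: A extracts the secondary diagonal into a list with a helper, rotates that list by pop/concat, and writes it back into the matrix with a third counter-driven loop (mutating in place); B is a single nested comprehension that builds a fresh matrix, replacing each diagonal cell (i, n-1-i) directly by the cell at the cyclically shifted diagonal position ((n-1-i) - step) mod n.
import Mathlib
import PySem

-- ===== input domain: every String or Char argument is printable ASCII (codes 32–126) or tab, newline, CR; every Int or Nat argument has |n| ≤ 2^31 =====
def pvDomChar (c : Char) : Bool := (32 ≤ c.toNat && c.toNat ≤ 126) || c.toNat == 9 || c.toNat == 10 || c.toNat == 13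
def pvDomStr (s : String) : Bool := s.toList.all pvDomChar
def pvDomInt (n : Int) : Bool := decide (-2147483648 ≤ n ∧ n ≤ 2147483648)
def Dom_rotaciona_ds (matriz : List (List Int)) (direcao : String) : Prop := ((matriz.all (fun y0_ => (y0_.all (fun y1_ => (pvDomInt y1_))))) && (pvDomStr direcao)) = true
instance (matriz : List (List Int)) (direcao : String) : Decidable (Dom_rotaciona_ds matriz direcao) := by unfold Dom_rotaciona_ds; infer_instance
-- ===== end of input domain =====

-- B replaces A's extract-rotate-writeback (helper + three loops, in-place mutation) by a single
-- nested comprehension building a fresh matrix (objective: simpler). A mutates `matriz` in place;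
-- B does not — the equivalence proved here is about the RETURN value only.


-- matriz[r][c] (both Pythons index by this double subscript); exact under Pre_ (indices in range)
def pvGet2 (m : List (List Int)) (r c : Int) : Int :=
  PySem.List.pyGetD (PySem.List.pyGetD m r []) c 0

-- ===== PORT A =====
def pega_diagional (matriz : List (List Int)) : List Int :=
  ((PySem.List.pyRange ((matriz.length : Int) - 1) (-1) (-1)).foldl
      (fun (st : List Int × Int) i => (st.1 ++ [pvGet2 matriz i st.2], st.2 + 1))
      ([], 0)).1

def rotaciona_ds (matriz : List (List Int)) (direcao : String) : List (List Int) :=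
  let diagonal_secundaria := pega_diagional matriz
  let diagonal_secundaria2 :=
    if direcao == "cima" then
      match PySem.List.pop? diagonal_secundaria with
      | some (ultimo_el, rest) => [ultimo_el] ++ rest
      | none => diagonal_secundaria      -- Python raises IndexError here (empty diagonal); outside Pre_
    else
      match PySem.List.pop? diagonal_secundaria 0 with
      | some (primeiro_el, rest) => rest ++ [primeiro_el]
      | none => diagonal_secundaria      -- Python raises IndexError here; outside Pre_
  ((PySem.List.pyRange 0 (diagonal_secundaria2.length : Int) 1).foldl
      (fun (st : List (List Int) × Int) i =>
        (PySem.List.pySetD st.1 i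
           (PySem.List.pySetD (PySem.List.pyGetD st.1 i []) st.2
              (PySem.List.pyGetD diagonal_secundaria2 st.2 0)),
         st.2 - 1))
      (matriz, (diagonal_secundaria2.length : Int) - 1)).1

-- ===== PORT B =====
def rotaciona_ds_alt (matriz : List (List Int)) (direcao : String) : List (List Int) :=
  let n : Int := matriz.length
  let step : Int := if direcao == "cima" then 1 else -1
  (PySem.List.enumerate matriz).map (fun p =>
    (PySem.List.enumerate p.2).map (fun q =>
      if q.1 == n - 1 - p.1 then
        pvGet2 matriz (n - 1 - PySem.Int.mod (n - 1 - p.1 - step) n)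
                      (PySem.Int.mod (n - 1 - p.1 - step) n)
      else q.2))

-- ===== PRECONDITION & SPEC =====
-- Pre_: exactly the inputs where Python A returns — a nonempty matrix whose row i reaches column
-- n-1-i (on [] the pop raises IndexError; a too-short row raises IndexError at the diagonal cell).
def Pre_rotaciona_ds (matriz : List (List Int)) (direcao : String) : Prop :=
  matriz ≠ [] ∧ ∀ i ∈ List.range matriz.length, matriz.length ≤ (matriz.getD i []).length + i
instance (matriz : List (List Int)) (direcao : String) : Decidable (Pre_rotaciona_ds matriz direcao) := by unfold Pre_rotaciona_ds; infer_instance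

def pvWitness_rotaciona_ds : List (List Int) × String := ([[1, 2], [3, 4]], "cima")

def Spec_rotaciona_ds (matriz : List (List Int)) (direcao : String) (out : List (List Int)) : Prop := out = rotaciona_ds_alt matriz direcao
instance (matriz : List (List Int)) (direcao : String) (out : List (List Int)) : Decidable (Spec_rotaciona_ds matriz direcao out) := by unfold Spec_rotaciona_ds; infer_instance

-- ===== CLAIM (what is proved, stated in full; the proofs are below) =====
def Claim_equal_rotaciona_ds : Prop := ∀ (matriz : List (List Int)) (direcao : String), Dom_rotaciona_ds matriz direcao → Pre_rotaciona_ds matriz direcao → Spec_rotaciona_ds matriz direcao (rotaciona_ds matriz direcao)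

-- ===== LEMMAS AND PROOFS =====

-- closed form of the diagonal A extracts, and of A's rotation of it (proof helpers)
def pvDiag (matriz : List (List Int)) : List Int :=
  (List.range matriz.length).map
    (fun k : Nat => pvGet2 matriz ((matriz.length : Int) - 1 - (k : Int)) (k : Int))

def pvRot (direcao : String) (ds : List Int) : List Int :=
  if direcao == "cima" then
    match PySem.List.pop? ds with
    | some (ultimo_el, rest) => [ultimo_el] ++ rest
    | none => ds
  else
    match PySem.List.pop? ds 0 with
    | some (primeiro_el, rest) => rest ++ [primeiro_el]
    | none => ds

-- Eliminate the running counter of a (state, counter) fold whose counter always equals K - i.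
-- counter decrements while i runs UP through pyRange a b 1:
theorem pv_countdown_elim {α : Type} (h : Int → Int → α → α) (K b : Int) :
    ∀ (k : Nat) (a : Int) (m : α), (b - a).toNat = k →
    ((PySem.List.pyRange a b 1).foldl (fun (st : α × Int) i => (h i st.2 st.1, st.2 - 1)) (m, K - a)).1
      = (PySem.List.pyRange a b 1).foldl (fun acc i => h i (K - i) acc) m := by
  intro k
  induction k with
  | zero => intro a m hk; rw [PySem.List.pyRange_one_eq_nil (by omega)]; rfl
  | succ k ih =>
      intro a m hk
      rw [PySem.List.pyRange_one_cons (by omega)]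
      simp only [List.foldl_cons]
      have : K - a - 1 = K - (a + 1) := by ring
      rw [this, ih (a + 1) _ (by omega)]

-- counter increments while i runs DOWN through pyRange a b (-1):
theorem pv_countup_elim {α : Type} (h : Int → Int → α → α) (K b : Int) :
    ∀ (k : Nat) (a : Int) (m : α), (a - b).toNat = k →
    ((PySem.List.pyRange a b (-1)).foldl (fun (st : α × Int) i => (h i st.2 st.1, st.2 + 1)) (m, K - a)).1
      = (PySem.List.pyRange a b (-1)).foldl (fun acc i => h i (K - i) acc) m := by
  intro k
  induction k with
  | zero => intro a m hk; rw [PySem.List.pyRange_neg_one_eq_nil (by omega)]; rfl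
  | succ k ih =>
      intro a m hk
      rw [PySem.List.pyRange_neg_one_cons (by omega)]
      simp only [List.foldl_cons]
      have : K - a + 1 = K - (a - 1) := by ring
      rw [this, ih (a - 1) _ (by omega)]

-- the diagonal A extracts: element k is matriz[n-1-k][k]
theorem pega_diagional_eq (matriz : List (List Int)) :
    pega_diagional matriz = pvDiag matriz := by
  unfold pega_diagional pvDiag
  have h0 : (0 : Int) = ((matriz.length : Int) - 1) - ((matriz.length : Int) - 1) := by ring
  rw [h0, pv_countup_elim (fun i c acc => acc ++ [pvGet2 matriz i c]) ((matriz.length : Int) - 1) (-1)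
        matriz.length ((matriz.length : Int) - 1) [] (by omega)]
  rw [PySem.List.foldl_append_singleton_eq_map, PySem.List.pyRange_neg_one]
  have h1 : (((matriz.length : Int) - 1) - (-1)).toNat = matriz.length := by omega
  rw [h1, List.map_map, List.nil_append]
  apply List.map_congr_left
  intro k hk
  simp only [Function.comp]
  congr 1
  ring

-- A's write-back loop, with the counter eliminated
theorem writeback_eq (ds2 : List Int) (matriz : List (List Int)) :
    ((PySem.List.pyRange 0 (ds2.length : Int) 1).foldl
      (fun (st : List (List Int) × Int) i =>
        (PySem.List.pySetD st.1 i
           (PySem.List.pySetD (PySem.List.pyGetD st.1 i []) st.2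
              (PySem.List.pyGetD ds2 st.2 0)),
         st.2 - 1))
      (matriz, (ds2.length : Int) - 1)).1
    = (List.range ds2.length).foldl
        (fun acc (i : Nat) =>
          acc.set i
            (PySem.List.pySetD (acc.getD i []) ((ds2.length : Int) - 1 - (i : Int))
               (PySem.List.pyGetD ds2 ((ds2.length : Int) - 1 - (i : Int)) 0))) matriz := by
  have h0 : ((ds2.length : Int) - 1) = ((ds2.length : Int) - 1) - 0 := by ring
  rw [h0, pv_countdown_elim
        (fun i c acc => PySem.List.pySetD acc i
          (PySem.List.pySetD (PySem.List.pyGetD acc i []) c (PySem.List.pyGetD ds2 c 0)))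
        ((ds2.length : Int) - 1) (ds2.length : Int) ds2.length 0 matriz (by omega)]
  rw [PySem.List.pyRange_zero_nat, List.foldl_map]
  apply PySem.List.foldl_congr_mem
  intro acc i hi
  simp

-- a fold over range(len m) that rewrites each row from its original value is a mapIdx
theorem pv_set_fold (g : Nat → List Int → List Int) :
    ∀ (m pre : List (List Int)),
    (List.range m.length).foldl
        (fun acc i => acc.set (pre.length + i) (g (pre.length + i) (acc.getD (pre.length + i) [])))
        (pre ++ m)
      = pre ++ m.mapIdx (fun i row => g (pre.length + i) row) := by
  intro m
  induction m with
  | nil => intro pre; simp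
  | cons row m ih =>
      intro pre
      rw [List.length_cons, List.range_succ_eq_map, List.foldl_cons, List.foldl_map]
      have h1 : (pre ++ row :: m).getD pre.length [] = row := by
        simp [List.getD]
      have h2 : (pre ++ row :: m).set pre.length (g pre.length row) = (pre ++ [g pre.length row]) ++ m := by
        rw [List.set_append_right _ _ (le_refl _)]
        simp
      simp only [Nat.add_zero, h1, h2]
      have h3 := ih (pre ++ [g pre.length row])
      simp only [List.length_append, List.length_singleton] at h3
      have h4 : ∀ i, pre.length + 1 + i = pre.length + (i + 1) := by omega
      simp only [h4] at h3
      rw [h3, List.mapIdx_cons]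
      simp

theorem pvRot_length (direcao : String) (ds : List Int) :
    (pvRot direcao ds).length = ds.length := by
  unfold pvRot
  split
  · rcases List.eq_nil_or_concat ds with h | ⟨xs, x, h⟩
    · subst h; rfl
    · subst h; simp only [List.concat_eq_append]; rw [PySem.List.pop?_last]; simp
  · cases ds with
    | nil => rfl
    | cons y ys => rw [PySem.List.pop?_zero_cons]; simp

-- A as a closed form: row i gets the rotated diagonal's entry n-1-i written at column n-1-i
theorem rotaciona_ds_closed (matriz : List (List Int)) (direcao : String) :
    rotaciona_ds matriz direcao
      = matriz.mapIdx (fun i row =>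
          PySem.List.pySetD row ((matriz.length : Int) - 1 - (i : Int))
            (PySem.List.pyGetD (pvRot direcao (pvDiag matriz))
              ((matriz.length : Int) - 1 - (i : Int)) 0)) := by
  have hA : rotaciona_ds matriz direcao
      = ((PySem.List.pyRange 0 ((pvRot direcao (pega_diagional matriz)).length : Int) 1).foldl
          (fun (st : List (List Int) × Int) i =>
            (PySem.List.pySetD st.1 i
               (PySem.List.pySetD (PySem.List.pyGetD st.1 i []) st.2
                  (PySem.List.pyGetD (pvRot direcao (pega_diagional matriz)) st.2 0)),
             st.2 - 1))
          (matriz, ((pvRot direcao (pega_diagional matriz)).length : Int) - 1)).1 := rfl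
  rw [hA, writeback_eq, pega_diagional_eq, pvRot_length]
  have hlen : (pvDiag matriz).length = matriz.length := by
    unfold pvDiag; simp
  rw [hlen]
  have := pv_set_fold
    (fun i row => PySem.List.pySetD row ((matriz.length : Int) - 1 - (i : Int))
      (PySem.List.pyGetD (pvRot direcao (pvDiag matriz)) ((matriz.length : Int) - 1 - (i : Int)) 0))
    matriz []
  simpa using this

-- the value written at diagonal position t equals the matrix cell B reads for that position
theorem pv_val_eq (matriz : List (List Int)) (direcao : String) (t : Nat)
    (ht : t < matriz.length) :
    PySem.List.pyGetD (pvRot direcao (pvDiag matriz)) (t : Int) 0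
      = pvGet2 matriz
          ((matriz.length : Int) - 1 -
            PySem.Int.mod ((t : Int) - (if direcao == "cima" then 1 else -1)) (matriz.length : Int))
          (PySem.Int.mod ((t : Int) - (if direcao == "cima" then 1 else -1)) (matriz.length : Int)) := by
  obtain ⟨k, hk⟩ : ∃ k, matriz.length = k + 1 := ⟨matriz.length - 1, by omega⟩
  set f : Nat → Int :=
    fun k' : Nat => pvGet2 matriz ((matriz.length : Int) - 1 - (k' : Int)) (k' : Int) with hf
  by_cases hc : (direcao == "cima") = true
  · -- cima : rotated diagonal is f k :: map f (range k)
    have hrot : pvRot direcao (pvDiag matriz) = f k :: (List.range k).map f := by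
      unfold pvRot pvDiag
      rw [if_pos hc, show List.range matriz.length = List.range k ++ [k] from by
            rw [hk, List.range_succ],
          List.map_append, List.map_singleton, PySem.List.pop?_last]
      rfl
    rw [hrot, if_pos hc, PySem.List.pyGetD_natCast]
    cases t with
    | zero =>
        have e1 : PySem.Int.mod (((0 : Nat) : Int) - 1) (matriz.length : Int) = (matriz.length : Int) - 1 := by
          rw [PySem.Int.mod_eq_emod_of_pos (by omega),
              show (((0 : Nat) : Int) - 1) = ((matriz.length : Int) - 1) + (matriz.length : Int) * (-1) from by
                push_cast; rw [hk]; push_cast; ring,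
              Int.add_mul_emod_self_left, Int.emod_eq_of_lt (by omega) (by omega)]
        rw [e1]
        simp only [List.getD_cons_zero, hf]
        congr 1 <;> omega
    | succ s =>
        have hs : s < k := by omega
        have e1 : PySem.Int.mod (((s + 1 : Nat) : Int) - 1) (matriz.length : Int) = (s : Int) := by
          rw [PySem.Int.mod_eq_emod_of_pos (by omega),
              show (((s + 1 : Nat) : Int) - 1) = (s : Int) from by push_cast; ring,
              Int.emod_eq_of_lt (by omega) (by omega)]
        rw [e1]
        rw [List.getD_cons_succ, List.getD_eq_getElem _ _ (by simpa using hs), List.getElem_map,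
            List.getElem_range]
  · -- other direction : rotated diagonal is map (f ∘ succ) (range k) ++ [f 0]
    have hrot : pvRot direcao (pvDiag matriz)
        = (List.range k).map (fun j => f (j + 1)) ++ [f 0] := by
      unfold pvRot pvDiag
      rw [if_neg hc, show List.range matriz.length = 0 :: (List.range k).map (· + 1) from by
            rw [hk, List.range_succ_eq_map],
          List.map_cons, PySem.List.pop?_zero_cons, List.map_map]
      rfl
    rw [hrot, if_neg hc, PySem.List.pyGetD_natCast]
    by_cases ht2 : t < k
    · have e1 : PySem.Int.mod ((t : Int) - (-1)) (matriz.length : Int) = (t : Int) + 1 := by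
        rw [PySem.Int.mod_eq_emod_of_pos (by omega),
            show ((t : Int) - (-1)) = (t : Int) + 1 from by ring,
            Int.emod_eq_of_lt (by omega) (by omega)]
      rw [e1]
      rw [List.getD_eq_getElem _ _ (by simp; omega), List.getElem_append_left (by simpa using ht2),
          List.getElem_map, List.getElem_range]
      rfl
    · have htk : t = k := by omega
      subst htk
      have e1 : PySem.Int.mod ((t : Int) - (-1)) (matriz.length : Int) = 0 := by
        rw [PySem.Int.mod_eq_emod_of_pos (by omega),
            show ((t : Int) - (-1)) = 0 + (matriz.length : Int) * 1 from by
              omega,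
            Int.add_mul_emod_self_left, Int.zero_emod]
      rw [e1]
      rw [List.getD_eq_getElem _ _ (by simp)]
      rw [List.getElem_append_right (by simp)]
      simp [hf]

-- ===== VERDICT (by name: the statement is the Claim_ definition above) =====
theorem rotaciona_ds_spec : Claim_equal_rotaciona_ds := by
  intro matriz direcao _hdom hpre
  obtain ⟨hne, _hrows⟩ := hpre
  have hn : 0 < matriz.length := List.length_pos_of_ne_nil hne
  unfold Spec_rotaciona_ds
  rw [rotaciona_ds_closed matriz direcao]
  unfold rotaciona_ds_alt
  apply List.ext_getElem
  · simp [PySem.List.length_enumerate]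
  intro i h1 h2
  rw [List.getElem_mapIdx, List.getElem_map, PySem.List.getElem_enumerate]
  have hi : i < matriz.length := by simpa using h1
  have hnn : (0 : Int) ≤ (matriz.length : Int) - 1 - (i : Int) := by omega
  rw [PySem.List.pySetD_of_nonneg _ _ hnn]
  apply List.ext_getElem
  · simp [PySem.List.length_enumerate]
  intro j hj1 hj2
  rw [List.getElem_set, List.getElem_map, PySem.List.getElem_enumerate]
  by_cases hij : (j : Int) = (matriz.length : Int) - 1 - (i : Int)
  · have hcond : ((matriz.length : Int) - 1 - (i : Int)).toNat = j := by omega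
    have hbeq : ((0 : Int) + (j : Int) == (matriz.length : Int) - 1 - (0 + (i : Int))) = true := by
      simp; omega
    rw [if_pos hcond, if_pos hbeq]
    have hjn : j < matriz.length := by omega
    simp only [zero_add]
    have hji : ((matriz.length : Int) - 1 - (i : Int)) = (j : Int) := hij.symm
    rw [hji, pv_val_eq matriz direcao j hjn]
  · have hcond : ¬ (((matriz.length : Int) - 1 - (i : Int)).toNat = j) := by omega
    have hbeq : ¬ (((0 : Int) + (j : Int) == (matriz.length : Int) - 1 - (0 + (i : Int))) = true) := by
      simp; omega
    rw [if_neg hcond, if_neg hbeq]
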